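-- pv_equiv track=rewrite | github.com/Nathan-Mort/Study | DS_2/ex01/read_and_write.py | csv_to_tsv
-- ===== SOURCE A (Python) =====
-- def csv_to_tsv(line):
--     in_quotes = False
--     tsv_line = []
--     current_field = []
--
--     for char in line:
--         if char == '"':
--             in_quotes = not in_quotes               # меняем на противоположное(в кавычках/не в кавычках)
--         elif char == ',' and not in_quotes:         # если мы не в кавычках
--             tsv_line.append(''.join(current_field)) # преобразуем в строку и добавляем в список tsv_line
--             current_field = []
--         else:
--             current_field.append(char)
--
--     tsv_line.append(''.join(current_field))
--     return '\t'.join(tsv_line)   # с помощью .join()  список преобразуем в строку с разделителями табуляциями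
-- ===== SOURCE B (Python) =====
-- def csv_to_tsv(line):
--     out = []
--     inside = False
--     for seg in line.split('"'):
--         out.append(seg if inside else ''.join('\t' if c == ',' else c for c in seg))
--         inside = not inside
--     return ''.join(out)
-- ===== Notes on version B (the rewrite author's own statement) =====
-- stated objective: alternative
-- what changed: Replaced the per-character in_quotes state machine that accumulates fields and joins them with tabs by splitting the line on the double-quote character into segments, substituting tab for comma in the even (outside-quotes) segments only, and concatenating.
import Mathlib
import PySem

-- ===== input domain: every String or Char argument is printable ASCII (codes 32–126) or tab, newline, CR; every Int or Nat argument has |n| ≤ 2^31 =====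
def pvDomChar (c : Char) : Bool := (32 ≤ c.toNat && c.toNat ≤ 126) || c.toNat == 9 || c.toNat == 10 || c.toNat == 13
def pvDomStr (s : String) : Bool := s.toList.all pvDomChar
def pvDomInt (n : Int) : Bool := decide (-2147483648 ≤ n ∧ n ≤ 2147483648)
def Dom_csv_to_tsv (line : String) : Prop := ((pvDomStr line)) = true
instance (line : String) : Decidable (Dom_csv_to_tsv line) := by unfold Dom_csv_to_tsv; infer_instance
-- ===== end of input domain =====

-- B replaces A's per-character quote state machine by split('"') with alternating per-segment
-- comma→tab substitution (objective: alternative decomposition, same cost).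

-- ===== PORT A =====
-- the for-loop over the characters, state = (in_quotes, tsv_line, current_field);
-- at the end A appends current_field and joins with '\t'
def csvLoopA : List Char → Bool → List (List Char) → List Char → List (List Char)
  | [], _, tsv, cur => tsv ++ [cur]
  | c :: rest, q, tsv, cur =>
    if c = '"' then csvLoopA rest (!q) tsv cur
    else if c = ',' ∧ ¬(q = true) then csvLoopA rest q (tsv ++ [cur]) []
    else csvLoopA rest q tsv (cur ++ [c])

def csv_to_tsv (line : String) : String :=
  String.mk (PySem.Chars.join ['\t'] (csvLoopA line.toList false [] []))

-- ===== PORT B =====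
-- the for-loop over the segments of line.split('"'), state = (out, inside)
def csvLoopB : List (List Char) → List (List Char) → Bool → List (List Char)
  | [], out, _ => out
  | seg :: rest, out, inside =>
      csvLoopB rest
        (out ++ [if inside then seg else seg.map (fun c => if c = ',' then '\t' else c)])
        (!inside)

def csv_to_tsv_alt (line : String) : String :=
  String.mk (PySem.Chars.join [] (csvLoopB (line.toList.splitOn '"') [] false))

-- ===== PRECONDITION & SPEC =====
def Spec_csv_to_tsv (line : String) (out : String) : Prop := out = csv_to_tsv_alt line
instance (line : String) (out : String) : Decidable (Spec_csv_to_tsv line out) := by unfold Spec_csv_to_tsv; infer_instance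

-- ===== CLAIM (what is proved, stated in full; the proofs are below) =====
def Claim_equal_csv_to_tsv : Prop := ∀ (line : String), Dom_csv_to_tsv line → Spec_csv_to_tsv line (csv_to_tsv line)

-- ===== LEMMAS AND PROOFS =====

-- canonical per-character result: quotes dropped, commas outside quotes become tabs
def canon (q : Bool) : List Char → List Char
  | [] => []
  | c :: t =>
    if c = '"' then canon (!q) t
    else if c = ',' ∧ ¬(q = true) then '\t' :: canon q t
    else c :: canon q t

theorem intercalate_cons₂ (s a b : List Char) (l : List (List Char)) :
    s.intercalate (a :: b :: l) = a ++ s ++ s.intercalate (b :: l) := by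
  simp [List.intercalate, List.intersperse]

theorem intercalate_snoc (s : List Char) :
    ∀ (xs : List (List Char)), xs ≠ [] → ∀ (a : List Char),
      s.intercalate (xs ++ [a]) = s.intercalate xs ++ s ++ a := by
  intro xs
  induction xs with
  | nil => intro h; exact absurd rfl h
  | cons x t ih =>
    intro _ a
    cases t with
    | nil => simp [List.intercalate]
    | cons y ys =>
      simp only [List.cons_append, intercalate_cons₂]
      rw [show y :: (ys ++ [a]) = y :: ys ++ [a] from rfl, ih (by simp) a]
      simp

theorem join_flatten (l : List (List Char)) :
    PySem.Chars.join [] l = l.flatten := by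
  induction l with
  | nil => simp [PySem.Chars.join, List.intercalate]
  | cons a t ih =>
    cases t with
    | nil => simp [PySem.Chars.join, List.intercalate]
    | cons b u =>
      simp only [PySem.Chars.join] at *
      rw [intercalate_cons₂]
      simp [ih]

theorem loopA_eq (cs : List Char) : ∀ (q : Bool) (tsv : List (List Char)) (cur : List Char),
    PySem.Chars.join ['\t'] (csvLoopA cs q tsv cur)
      = PySem.Chars.join ['\t'] (tsv ++ [cur]) ++ canon q cs := by
  induction cs with
  | nil => intro q tsv cur; simp [csvLoopA, canon]
  | cons c rest ih =>
    intro q tsv cur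
    by_cases hq : c = '"'
    · simp [csvLoopA, canon, hq, ih]
    · by_cases hc : c = ',' ∧ ¬(q = true)
      · simp only [csvLoopA, canon, if_neg hq, if_pos hc, ih]
        simp only [PySem.Chars.join]
        rw [show (tsv ++ [cur]) ++ [([] : List Char)] = (tsv ++ [cur]) ++ [[]] from rfl,
          intercalate_snoc _ (tsv ++ [cur]) (by simp) []]
        simp
      · simp only [csvLoopA, canon, if_neg hq, if_neg hc, ih]
        simp only [PySem.Chars.join]
        have h1 := intercalate_snoc ['\t'] tsv
        cases tsv with
        | nil => simp [List.intercalate]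
        | cons x xs =>
          rw [h1 (by simp) (cur ++ [c]), h1 (by simp) cur]
          simp

theorem loopB_shift (segs : List (List Char)) : ∀ (out : List (List Char)) (q : Bool),
    csvLoopB segs out q = out ++ csvLoopB segs [] q := by
  induction segs with
  | nil => intro out q; simp [csvLoopB]
  | cons seg rest ih =>
    intro out q
    simp only [csvLoopB]
    generalize (if q = true then seg else List.map (fun c => if c = ',' then '\t' else c) seg) = z
    rw [ih (out ++ [z]), ih ([] ++ [z])]
    simp

-- B over the split of cs computes canon
theorem splitB_eq (cs : List Char) : ∀ (q : Bool),
    (csvLoopB (cs.splitOn '"') [] q).flatten = canon q cs := by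
  induction cs with
  | nil =>
    intro q
    simp only [List.splitOn, List.splitOnP_nil]
    cases q <;> simp [csvLoopB, canon]
  | cons c rest ih =>
    intro q
    by_cases hq : c = '"'
    · rw [show (c :: rest).splitOn '"' = [] :: rest.splitOn '"' by
        simp [List.splitOn, List.splitOnP_cons, hq]]
      simp only [csvLoopB]
      rw [loopB_shift]
      cases q <;> simp [canon, hq, ih]
    · obtain ⟨s, tail, hs⟩ : ∃ s tail, rest.splitOn '"' = s :: tail := by
        cases h : rest.splitOn '"' with
        | nil => exact absurd h (List.splitOnP_ne_nil _ _)
        | cons s tail => exact ⟨s, tail, rfl⟩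
      rw [show (c :: rest).splitOn '"' = (c :: s) :: tail by
        simp only [List.splitOn, List.splitOnP_cons, beq_iff_eq, if_neg hq]
        simp only [List.splitOn] at hs
        rw [hs]; rfl]
      have hrest := ih q
      rw [hs] at hrest
      simp only [csvLoopB] at hrest ⊢
      rw [loopB_shift] at hrest ⊢
      simp only [List.flatten_append] at hrest ⊢
      cases q with
      | false =>
        simp only [Bool.not_false, if_neg (by simp : ¬(false = true))] at hrest ⊢
        simp only [canon, if_neg hq]
        by_cases hc : c = ','
        · simp only [hc, List.map_cons] at hrest ⊢
          simp at hrest ⊢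
          rw [hrest]
        · simp only [List.map_cons, if_neg hc] at hrest ⊢
          simp at hrest ⊢
          rw [hrest]
          simp [hc]
      | true =>
        simp only [canon, if_neg hq]
        simp at hrest ⊢
        rw [hrest]

-- ===== VERDICT (by name: the statement is the Claim_ definition above) =====
theorem csv_to_tsv_spec : Claim_equal_csv_to_tsv := by
  intro line _
  unfold Spec_csv_to_tsv csv_to_tsv csv_to_tsv_alt
  rw [join_flatten, splitB_eq]
  have := loopA_eq line.toList false [] []
  simp only [List.nil_append] at this
  rw [this]
  simp [PySem.Chars.join, List.intercalate]
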